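-- pv_equiv track=rewrite | github.com/meheru273/Braille-recognition | cloud/assistant-api/assistant.py | _fallback_braille_processing
-- ===== SOURCE A (Python) =====
-- def _fallback_braille_processing(text: str) -> str:
--     """Basic braille processing without API"""
--     # Simple cleaning and formatting
--     cleaned = text.strip()
--
--     # Basic word formation (this is very simplified)
--     if len(cleaned) > 10:
--         # Try to identify word boundaries (very basic)
--         words = []
--         current_word = ""
--
--         for char in cleaned:
--             if char.isspace() or char in ".,!?":
--                 if current_word:
--                     words.append(current_word)
--                     current_word = ""
--                 if char in ".,!?":
--                     words.append(char)
--             else: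
--                 current_word += char
--
--         if current_word:
--             words.append(current_word)
--
--         return " ".join(words)
--
--     return cleaned
-- ===== SOURCE B (Python) =====
-- def _fallback_braille_processing(text: str) -> str:
--     """Basic braille processing without API (span-scanning tokenizer)."""
--     cleaned = text.strip()
--     if len(cleaned) <= 10:
--         return cleaned
--     tokens = []
--     i, n = 0, len(cleaned)
--     while i < n:
--         c = cleaned[i]
--         if c in ".,!?":
--             tokens.append(c)
--             i += 1
--         elif c.isspace():
--             i += 1
--         else:
--             j = i + 1
--             while j < n and not (cleaned[j].isspace() or cleaned[j] in ".,!?"):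
--                 j += 1
--             tokens.append(cleaned[i:j])
--             i = j
--     return " ".join(tokens)
-- ===== Notes on version B (the rewrite author's own statement) =====
-- stated objective: alternative
-- what changed: Replaces A's per-character loop with a current_word accumulator by a span-scanning tokenizer: emit each punctuation mark, skip whitespace, and slice out each maximal word with an inner scan, so no accumulator string is maintained.
import Mathlib
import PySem

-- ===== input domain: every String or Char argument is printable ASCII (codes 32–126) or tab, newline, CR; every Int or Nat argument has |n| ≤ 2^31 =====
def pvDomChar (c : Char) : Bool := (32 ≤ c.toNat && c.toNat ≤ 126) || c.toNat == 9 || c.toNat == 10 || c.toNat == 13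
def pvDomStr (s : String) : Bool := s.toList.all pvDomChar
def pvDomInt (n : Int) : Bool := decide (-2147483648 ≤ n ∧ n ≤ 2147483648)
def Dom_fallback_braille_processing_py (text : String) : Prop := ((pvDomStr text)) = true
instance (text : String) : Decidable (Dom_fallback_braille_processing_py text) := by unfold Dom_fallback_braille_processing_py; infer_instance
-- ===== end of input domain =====

-- B replaces A's per-character accumulator loop with a span-scanning tokenizer
-- (emit each punctuation mark, skip whitespace, slice out a maximal word in one inner scan); objective: alternative.

-- ===== PORT A =====
-- `char in ".,!?"` (single character membership test, used by both Pythons)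
def pvPunct (c : Char) : Bool := c == '.' || c == ',' || c == '!' || c == '?'

-- A's loop body over the state (words, current_word)
def pvStepA (st : List (List Char) × List Char) (c : Char) : List (List Char) × List Char :=
  if PySem.Chars.isspace c || pvPunct c then
    let ws := if st.2.isEmpty then st.1 else st.1 ++ [st.2]
    let ws := if pvPunct c then ws ++ [[c]] else ws
    (ws, [])
  else
    (st.1, st.2 ++ [c])

def fallback_braille_processing_py (text : String) : String :=
  let cleaned := PySem.Str.strip text
  if 10 < PySem.Str.len cleaned then
    let st := cleaned.toList.foldl pvStepA ([], [])
    let words := if st.2.isEmpty then st.1 else st.1 ++ [st.2]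
    String.ofList (PySem.Chars.join [' '] words)
  else
    cleaned

-- ===== PORT B =====
def pvWordChar (c : Char) : Bool := !(PySem.Chars.isspace c || pvPunct c)

-- Source B's outer while loop; the inner word-scan `while j < n and …` is the takeWhile/dropWhile span
def pvTokens : List Char → List (List Char)
  | [] => []
  | c :: rest =>
    if pvPunct c then [c] :: pvTokens rest
    else if PySem.Chars.isspace c then pvTokens rest
    else ((c :: rest).takeWhile pvWordChar) :: pvTokens ((c :: rest).dropWhile pvWordChar)
termination_by cs => cs.length
decreasing_by
  · simp only [List.length_cons]; omega
  · simp only [List.length_cons]; omega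
  · simp only [List.dropWhile]
    have hw : pvWordChar c = true := by
      simp only [pvWordChar]; simp_all
    rw [hw]
    simp only [List.length_cons]
    exact Nat.lt_succ_of_le (List.length_dropWhile_le pvWordChar rest)

def fallback_braille_processing_py_alt (text : String) : String :=
  let cleaned := PySem.Str.strip text
  if PySem.Str.len cleaned ≤ 10 then cleaned
  else String.ofList (PySem.Chars.join [' '] (pvTokens cleaned.toList))

-- ===== PRECONDITION & SPEC =====
def Spec_fallback_braille_processing_py (text : String) (out : String) : Prop := out = fallback_braille_processing_py_alt text
instance (text : String) (out : String) : Decidable (Spec_fallback_braille_processing_py text out) := by unfold Spec_fallback_braille_processing_py; infer_instance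

-- ===== CLAIM (what is proved, stated in full; the proofs are below) =====
def Claim_equal_fallback_braille_processing_py : Prop := ∀ (text : String), Dom_fallback_braille_processing_py text → Spec_fallback_braille_processing_py text (fallback_braille_processing_py text)

-- ===== LEMMAS AND PROOFS =====

-- finalize A's state after the loop
def pvFin (st : List (List Char) × List Char) : List (List Char) :=
  if st.2.isEmpty then st.1 else st.1 ++ [st.2]

-- the pending current_word, folded into B's token list
def pvPend (cur cs : List Char) : List (List Char) :=
  if cur.isEmpty then pvTokens cs
  else (cur ++ cs.takeWhile pvWordChar) :: pvTokens (cs.dropWhile pvWordChar)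

lemma pvLoop (cs : List Char) : ∀ ws cur,
    pvFin (cs.foldl pvStepA (ws, cur)) = ws ++ pvPend cur cs := by
  induction cs with
  | nil =>
    intro ws cur
    by_cases hc : cur.isEmpty <;> simp [pvFin, pvPend, pvTokens, hc]
  | cons c cs ih =>
    intro ws cur
    rw [List.foldl_cons]
    by_cases hp : pvPunct c = true
    · have hw : pvWordChar c = false := by simp [pvWordChar, hp]
      have ht : pvTokens (c :: cs) = [c] :: pvTokens cs := by
        rw [pvTokens]; simp [hp]
      have hstep : pvStepA (ws, cur) c
          = ((if cur.isEmpty then ws else ws ++ [cur]) ++ [[c]], []) := by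
        simp [pvStepA, hp]
      rw [hstep, ih]
      by_cases hc : cur.isEmpty <;>
        simp [pvPend, hc, ht, List.takeWhile, List.dropWhile, hw]
    · by_cases hsp : PySem.Chars.isspace c = true
      · have hw : pvWordChar c = false := by simp [pvWordChar, hsp]
        have ht : pvTokens (c :: cs) = pvTokens cs := by
          rw [pvTokens]; simp [hp, hsp]
        have hstep : pvStepA (ws, cur) c
            = (if cur.isEmpty then ws else ws ++ [cur], []) := by
          simp [pvStepA, hp, hsp]
        rw [hstep, ih]
        by_cases hc : cur.isEmpty <;>
          simp [pvPend, hc, ht, List.takeWhile, List.dropWhile, hw]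
      · have hw : pvWordChar c = true := by simp [pvWordChar, hsp, hp]
        have ht : pvTokens (c :: cs)
            = ((c :: cs).takeWhile pvWordChar) :: pvTokens ((c :: cs).dropWhile pvWordChar) := by
          rw [pvTokens]; simp [hp, hsp]
        have hstep : pvStepA (ws, cur) c = (ws, cur ++ [c]) := by
          simp [pvStepA, hp, hsp]
        rw [hstep, ih]
        by_cases hc : cur.isEmpty
        · have hce : cur = [] := by simpa [List.isEmpty_iff] using hc
          subst hce
          simp [pvPend, ht, List.takeWhile, List.dropWhile, hw]
        · simp [pvPend, hc, List.takeWhile, List.dropWhile, hw]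

-- A's finalized loop result IS B's token list
lemma pvMain (cs : List Char) :
    (if (cs.foldl pvStepA ([], [])).2.isEmpty then (cs.foldl pvStepA ([], [])).1
     else (cs.foldl pvStepA ([], [])).1 ++ [(cs.foldl pvStepA ([], [])).2]) = pvTokens cs := by
  have hl := pvLoop cs [] []
  simpa [pvFin, pvPend] using hl

-- ===== VERDICT (by name: the statement is the Claim_ definition above) =====
theorem fallback_braille_processing_py_spec : Claim_equal_fallback_braille_processing_py := by
  intro text _
  unfold Spec_fallback_braille_processing_py
  unfold fallback_braille_processing_py fallback_braille_processing_py_alt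
  simp only []
  by_cases h : 10 < PySem.Str.len (PySem.Str.strip text)
  · rw [if_pos h, if_neg (not_le.mpr h), pvMain]
  · rw [if_neg h, if_pos (not_lt.mp h)]
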